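-- pv_equiv track=rewrite | github.com/salieri11/concord-bft | hermes/util/helper.py | parse_long_running_test_result
-- ===== SOURCE A (Python) =====
-- def parse_long_running_test_result(testset_result_dict):
--    '''
--    Parse log running test results
--    :param testset_result_dict: run results from various tests
--    :return: iteration result, and True if all tests failed, else False
--    '''
--    all_tests_failed = True
--    test_result = None
--    for test_result_set in testset_result_dict["iteration_summary"]:
--       for test_count, result_set in test_result_set.items():
--          if result_set["test_result"]:
--             all_tests_failed = False
--             if test_result is not False:
--                test_result = True
--          else:
--             test_result = False
--
--    return test_result == True, all_tests_failed
-- ===== SOURCE B (Python) =====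
-- def parse_long_running_test_result(testset_result_dict):
--     def tally(iterations):
--         # recursively count (total results, passed results) over the tail,
--         # then add this iteration's counts
--         if not iterations:
--             return (0, 0)
--         total, passed = tally(iterations[1:])
--         for result_set in iterations[0].values():
--             total += 1
--             if result_set["test_result"]:
--                 passed += 1
--         return (total, passed)
--
--     total, passed = tally(testset_result_dict["iteration_summary"])
--     return (total > 0 and passed == total, passed == 0)
-- ===== Notes on version B (the rewrite author's own statement) =====
-- stated objective: alternative
-- what changed: Replaces A's nested loops threading a tri-state None/True/False flag and an all_tests_failed boolean with a recursive tally of integer (total, passed) counters, deriving both answers arithmetically (total>0 and passed==total, passed==0).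
import Mathlib
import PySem

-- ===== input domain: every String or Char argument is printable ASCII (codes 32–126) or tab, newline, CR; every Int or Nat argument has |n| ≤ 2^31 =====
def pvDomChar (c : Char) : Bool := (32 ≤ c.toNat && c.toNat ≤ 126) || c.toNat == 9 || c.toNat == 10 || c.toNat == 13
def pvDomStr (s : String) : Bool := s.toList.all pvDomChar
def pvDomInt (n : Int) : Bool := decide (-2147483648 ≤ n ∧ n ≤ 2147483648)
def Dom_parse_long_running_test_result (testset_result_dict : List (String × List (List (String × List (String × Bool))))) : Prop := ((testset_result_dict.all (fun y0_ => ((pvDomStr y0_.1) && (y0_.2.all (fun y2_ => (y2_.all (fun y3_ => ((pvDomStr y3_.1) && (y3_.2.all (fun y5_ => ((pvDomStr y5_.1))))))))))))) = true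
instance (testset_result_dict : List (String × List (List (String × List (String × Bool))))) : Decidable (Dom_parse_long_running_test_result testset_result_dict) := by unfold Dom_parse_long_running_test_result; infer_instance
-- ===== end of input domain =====

-- ===== PORT A =====
-- B tallies integer (total, passed) counters recursively and derives both booleans
-- arithmetically, instead of A's tri-state flag threading; same cost, alternative structure.
-- assoc-list lookup (Python dict lookup = first matching key; none = KeyError)
def pvLookup {a : Type} (l : List (String × a)) (k : String) : Option a :=
  (l.find? (fun p => p.1 == k)).map (fun p => p.2)

-- one step of A's inner loop body on state (all_tests_failed, test_result)
def pvStepA (st : Bool × Option Bool) (b : Bool) : Bool × Option Bool :=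
  if b then (false, if st.2 ≠ some false then some true else st.2)
  else (st.1, some false)

def parse_long_running_test_result (testset_result_dict : List (String × List (List (String × List (String × Bool))))) : Bool × Bool :=
  let iters := (pvLookup testset_result_dict "iteration_summary").getD []
  let st := iters.foldl
    (fun st test_result_set =>
      test_result_set.foldl
        (fun st kv => pvStepA st ((pvLookup kv.2 "test_result").getD false)) st)
    (true, none)
  (st.2 == some true, st.1)

-- ===== PORT B =====
-- B's recursive helper: (total, passed) counters over the iteration list
def pvTally (iterations : List (List (String × List (String × Bool)))) : Int × Int :=
  match iterations with
  | [] => (0, 0)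
  | head :: rest =>
    let np := pvTally rest
    head.foldl
      (fun np kv =>
        (np.1 + 1, if (pvLookup kv.2 "test_result").getD false then np.2 + 1 else np.2))
      np

def parse_long_running_test_result_alt (testset_result_dict : List (String × List (List (String × List (String × Bool))))) : Bool × Bool :=
  let np := pvTally ((pvLookup testset_result_dict "iteration_summary").getD [])
  (decide (np.1 > 0) && decide (np.2 = np.1), decide (np.2 = 0))

-- ===== PRECONDITION & SPEC =====
-- Pre_ excludes exactly the inputs where A raises KeyError (missing "iteration_summary" key,
-- or an inner result dict without a "test_result" key); B raises the same KeyError there.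
def Pre_parse_long_running_test_result (testset_result_dict : List (String × List (List (String × List (String × Bool))))) : Prop :=
  (pvLookup testset_result_dict "iteration_summary").isSome = true ∧
  ∀ ts ∈ (pvLookup testset_result_dict "iteration_summary").getD [],
    ∀ kv ∈ ts, (pvLookup kv.2 "test_result").isSome = true
instance (testset_result_dict : List (String × List (List (String × List (String × Bool))))) : Decidable (Pre_parse_long_running_test_result testset_result_dict) := by unfold Pre_parse_long_running_test_result; infer_instance
def pvWitness_parse_long_running_test_result : (List (String × List (List (String × List (String × Bool))))) :=
  [("iteration_summary", [[("1", [("test_result", true)])]])]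
def Spec_parse_long_running_test_result (testset_result_dict : List (String × List (List (String × List (String × Bool))))) (out : Bool × Bool) : Prop := out = parse_long_running_test_result_alt testset_result_dict
instance (testset_result_dict : List (String × List (List (String × List (String × Bool))))) (out : Bool × Bool) : Decidable (Spec_parse_long_running_test_result testset_result_dict out) := by unfold Spec_parse_long_running_test_result; infer_instance

-- ===== CLAIM (what is proved, stated in full; the proofs are below) =====
def Claim_equal_parse_long_running_test_result : Prop := ∀ (testset_result_dict : List (String × List (List (String × List (String × Bool))))), Dom_parse_long_running_test_result testset_result_dict → Pre_parse_long_running_test_result testset_result_dict → Spec_parse_long_running_test_result testset_result_dict (parse_long_running_test_result testset_result_dict)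

-- ===== LEMMAS AND PROOFS =====

-- the boolean each kv contributes
def pvVal (kv : String × List (String × Bool)) : Bool :=
  (pvLookup kv.2 "test_result").getD false

-- characterisation of A's flag-threading fold over a flat boolean list
theorem foldl_pvStepA (bs : List Bool) (f : Bool) (t : Option Bool) :
    bs.foldl pvStepA (f, t)
      = (f && !bs.any id,
         if t = some false then some false
         else if bs.isEmpty then t else some (bs.all id)) := by
  induction bs generalizing f t with
  | nil => simp
  | cons b bs ih =>
    cases b <;> rcases t with _ | tb <;> (try cases tb) <;>
      simp [pvStepA, ih, List.any_cons, List.all_cons] <;>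
      (rintro rfl; simp)

-- nested fold over the structure = fold over the flattened boolean list
theorem foldl_nested (iters : List (List (String × List (String × Bool))))
    (st : Bool × Option Bool) :
    iters.foldl (fun st ts => ts.foldl (fun st kv => pvStepA st (pvVal kv)) st) st
      = (iters.flatMap (fun ts => ts.map pvVal)).foldl pvStepA st := by
  induction iters generalizing st with
  | nil => rfl
  | cons ts rest ih => simp [ih, List.foldl_map, List.foldl_append]

-- the inner counting fold adds this iteration's length and true-count
theorem foldl_count (ts : List (String × List (String × Bool))) (n p : Int) :
    ts.foldl (fun np kv =>
        (np.1 + 1, if (pvLookup kv.2 "test_result").getD false then np.2 + 1 else np.2)) (n, p)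
      = (n + ts.length, p + (ts.map pvVal).count true) := by
  induction ts generalizing n p with
  | nil => simp
  | cons kv rest ih =>
    rw [List.foldl_cons,
        show ((pvLookup kv.2 "test_result").getD false) = pvVal kv from rfl]
    cases h : pvVal kv
    · simp [ih, h]
      push_cast; ring
    · simp [ih, h]
      constructor <;> push_cast <;> ring

-- pvTally computes (length, true-count) of the flattened boolean list
theorem pvTally_flat (iters : List (List (String × List (String × Bool)))) :
    pvTally iters
      = (((iters.flatMap (fun ts => ts.map pvVal)).length : Int),
         ((iters.flatMap (fun ts => ts.map pvVal)).count true : Int)) := by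
  induction iters with
  | nil => rfl
  | cons ts rest ih =>
    show (ts.foldl _ (pvTally rest)) = _
    rw [ih, foldl_count]
    simp [List.count_append, Prod.ext_iff]
    push_cast; constructor <;> ring

-- all = (true-count = length), any = (true-count ≠ 0)
theorem count_all_any (bs : List Bool) :
    (bs.all id = decide (bs.count true = bs.length)) ∧
    (bs.any id = decide (bs.count true ≠ 0)) := by
  induction bs with
  | nil => simp
  | cons b bs ih =>
    obtain ⟨h1, h2⟩ := ih
    have hle := List.count_le_length (l := bs) (a := true)
    cases b <;> simp [List.count_cons, h1, h2] <;> omega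

-- ===== VERDICT (by name: the statement is the Claim_ definition above) =====
theorem parse_long_running_test_result_spec : Claim_equal_parse_long_running_test_result := by
  intro d _ _
  unfold Spec_parse_long_running_test_result parse_long_running_test_result parse_long_running_test_result_alt
  dsimp only
  rw [show (fun (st : Bool × Option Bool) kv => pvStepA st ((pvLookup kv.2 "test_result").getD false)) = (fun st kv => pvStepA st (pvVal kv)) from rfl]
  rw [foldl_nested, foldl_pvStepA, pvTally_flat]
  cases h : (((pvLookup d "iteration_summary").getD []).flatMap (fun ts => ts.map pvVal)) with
  | nil => simp
  | cons b bs =>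
    obtain ⟨h1, h2⟩ := count_all_any (b :: bs)
    have hle := List.count_le_length (l := b :: bs) (a := true)
    simp only [List.isEmpty_cons, h1, h2]
    simp [Prod.ext_iff]
    omega
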